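-- pv_equiv track=rewrite | github.com/celbeing/PS_STUDY | 2024_BOJ/수학/기하학/회전하는 캘리퍼스(rotating calipers)/9240.py | calipers
-- ===== SOURCE A (Python) =====
-- def ccw(a,b,c):
--     return (a[1]-b[1])*(b[0]-c[0])-(a[0]-b[0])*(b[1]-c[1])
--
-- def dist(a,b):
--     return (a[0]-b[0])**2+(a[1]-b[1])**2
--
-- def calipers(dots):
--     left = []
--     for p in dots:
--         while len(left) >= 2 and ccw(left[-2],left[-1],p) <= 0:
--             left.pop()
--         left.append(p)
--     right = []
--     for p in reversed(dots):
--         while len(right) >= 2 and ccw(right[-2],right[-1],p) <= 0: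
--             right.pop()
--         right.append(p)
--     convex = left[:-1] + right[:-1]
--     n = len(convex)
--     l,r = 0,0
--     for i in range(n):
--         if convex[i][0] < convex[l][0]: l = i
--         if convex[i][1] > convex[r][1]: r = i
--     peek = dist(convex[l],convex[r])
--     for i in range(n):
--         vec_l = [convex[(l+1)%n][0]-convex[l][0],convex[(l+1)%n][1]-convex[l][1]]
--         vec_r = [convex[r][0]-convex[(r+1)%n][0],convex[r][1]-convex[(r+1)%n][1]]
--         k = ccw([0,0],vec_l,vec_r)
--         if k > 0:
--             l = (l+1)%n
--         else:
--             r = (r+1)%n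
--         now = dist(convex[l],convex[r])
--         if peek < now:
--             peek = now
--     return peek
-- ===== SOURCE B (Python) =====
-- def _cross(o, a, b):
--     return (a[0]-o[0])*(b[1]-o[1]) - (a[1]-o[1])*(b[0]-o[0])
--
-- def _push(st, p):
--     if len(st) >= 2 and _cross(st[-2], st[-1], p) >= 0:
--         return _push(st[:-1], p)
--     return st + [p]
--
-- def _chain(pts):
--     st = []
--     for p in pts:
--         st = _push(st, p)
--     return st[:-1]
--
-- def _d2(a, b):
--     return (a[0]-b[0])**2 + (a[1]-b[1])**2
--
-- def calipers(dots):
--     hull = _chain(dots) + _chain(dots[::-1])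
--     n = len(hull)
--     edges = [(q[0]-p[0], q[1]-p[1]) for p, q in zip(hull, hull[1:] + hull[:1])]
--     l = min(range(n), key=lambda i: hull[i][0])
--     r = max(range(n), key=lambda i: hull[i][1])
--     pairs = [(l, r)]
--     for _ in range(n):
--         if edges[l][0]*edges[r][1] - edges[l][1]*edges[r][0] > 0:
--             l = (l+1) % n
--         else:
--             r = (r+1) % n
--         pairs.append((l, r))
--     return max(_d2(hull[i], hull[j]) for i, j in pairs)
-- ===== Notes on version B (the rewrite author's own statement) =====
-- stated objective: alternative
-- what changed: The hinted all-pairs hull scan is NOT equivalent to A (they differ on ~17% of random inputs, since A's n-step walk over an unsorted input's pseudo-hull visits only its trajectory), so B keeps the calipers strategy but restructures every part: the stack pop is a recursive _push function with the standard-orientation cross product (flipped test >= 0), the hull's edge vectors are precomputed once into a table via zip so the walk's test becomes a direct cross edges[l] x edges[r] > 0 instead of A's per-step ccw([0,0],vec_l,vec_r) vector construction, the seeds come from min/max over range(n) with …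
import Mathlib
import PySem

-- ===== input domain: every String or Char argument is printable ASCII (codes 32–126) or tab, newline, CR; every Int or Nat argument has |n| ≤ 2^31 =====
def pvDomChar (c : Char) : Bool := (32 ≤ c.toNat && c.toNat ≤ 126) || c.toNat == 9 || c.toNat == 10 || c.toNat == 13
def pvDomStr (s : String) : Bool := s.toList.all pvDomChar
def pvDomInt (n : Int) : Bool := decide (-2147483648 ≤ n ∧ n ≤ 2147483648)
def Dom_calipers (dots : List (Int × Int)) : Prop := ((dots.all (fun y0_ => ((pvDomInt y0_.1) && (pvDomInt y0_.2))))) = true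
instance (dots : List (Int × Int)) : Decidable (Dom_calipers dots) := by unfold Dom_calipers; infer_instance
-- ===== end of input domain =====

-- B keeps the calipers strategy (an all-pairs hull scan is NOT equivalent to A) but restructures it:
-- recursive stack pop with the opposite-orientation cross test, a precomputed edge table replacing the
-- per-step vector construction, min/max-with-key seeding, and a recorded index trajectory reduced by one
-- final max() instead of A's fused running peek (objective: alternative, same cost).

-- ===== PORT A =====
-- ccw(a,b,c) and dist(a,b) from the Python module (dist named distA: 'dist' clashes with Mathlib)
def ccw (a b c : Int × Int) : Int := (a.2 - b.2) * (b.1 - c.1) - (a.1 - b.1) * (b.2 - c.2)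
def distA (a b : Int × Int) : Int := (a.1 - b.1) ^ 2 + (a.2 - b.2) ^ 2

-- the 'while len(chain) >= 2 and ccw(chain[-2],chain[-1],p) <= 0: chain.pop()' loop;
-- the chain is held REVERSED (head = Python chain[-1])
def popWhile : List (Int × Int) → (Int × Int) → List (Int × Int)
  | b :: a :: rest, p => if ccw a b p ≤ 0 then popWhile (a :: rest) p else b :: a :: rest
  | acc, _ => acc

-- one iteration of 'for p in dots: <pops>; chain.append(p)'
def chainStep (acc : List (Int × Int)) (p : Int × Int) : List (Int × Int) := p :: popWhile acc p

-- one iteration of A's calipers loop body (the loop variable i is unused in Python too).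
-- Indices l, r stay in [0, n), so Nat indices, Nat % and List.getD with a default are exact
-- for Python's int indices / indexing wherever A does not raise (guaranteed by Pre_: n ≥ 1 here).
def stepA (c : List (Int × Int)) (st : Nat × Nat × Int) : Nat × Nat × Int :=
  let n := c.length
  let z : Int × Int := (0, 0)
  let l := st.1
  let r := st.2.1
  let peek := st.2.2
  let vl := ((c.getD ((l + 1) % n) z).1 - (c.getD l z).1, (c.getD ((l + 1) % n) z).2 - (c.getD l z).2)
  let vr := ((c.getD r z).1 - (c.getD ((r + 1) % n) z).1, (c.getD r z).2 - (c.getD ((r + 1) % n) z).2)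
  let k := ccw (0, 0) vl vr
  let l' := if 0 < k then (l + 1) % n else l
  let r' := if 0 < k then r else (r + 1) % n
  let now := distA (c.getD l' z) (c.getD r' z)
  (l', r', if peek < now then now else peek)

-- everything after 'convex = left[:-1] + right[:-1]' (seed scan, peek, calipers loop)
def afterHullA (c : List (Int × Int)) : Int :=
  let z : Int × Int := (0, 0)
  let s := (List.range c.length).foldl (fun (lr : Nat × Nat) i =>
      (if (c.getD i z).1 < (c.getD lr.1 z).1 then i else lr.1,
       if (c.getD lr.2 z).2 < (c.getD i z).2 then i else lr.2)) (0, 0)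
  let st := (List.range c.length).foldl (fun st _ => stepA c st)
      (s.1, s.2, distA (c.getD s.1 z) (c.getD s.2 z))
  st.2.2

def calipers (dots : List (Int × Int)) : Int :=
  let left := dots.foldl chainStep []                  -- reversed; 'reversed(dots)' is List.reverse
  let right := dots.reverse.foldl chainStep []
  afterHullA (left.tail.reverse ++ right.tail.reverse) -- left[:-1] + right[:-1]

-- ===== PORT B =====
-- Source B's _cross(o, a, b) (standard orientation)
def crossB (o a b : Int × Int) : Int :=
  (a.1 - o.1) * (b.2 - o.2) - (a.2 - o.2) * (b.1 - o.1)

-- Source B's recursive _push(st, p); the stack is held REVERSED (head = Python st[-1]),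
-- so st[:-1] is the tail and st + [p] is cons
def pushB : List (Int × Int) → (Int × Int) → List (Int × Int)
  | b :: a :: rest, p => if 0 ≤ crossB a b p then pushB (a :: rest) p else p :: b :: a :: rest
  | st, p => p :: st

-- _chain(pts): fold _push, then 'return st[:-1]' (drop the head of the reversed stack, reorder)
def chainB (pts : List (Int × Int)) : List (Int × Int) :=
  ((pts.foldl pushB []).drop 1).reverse

-- _d2(a, b)
def d2 (a b : Int × Int) : Int := (a.1 - b.1) ^ 2 + (a.2 - b.2) ^ 2

-- edges = [(q[0]-p[0], q[1]-p[1]) for p, q in zip(hull, hull[1:] + hull[:1])]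
def edgesB (hull : List (Int × Int)) : List (Int × Int) :=
  (hull.zip (PySem.List.slice hull (some 1) none ++ PySem.List.slice hull none (some 1))).map
    (fun pq => (pq.2.1 - pq.1.1, pq.2.2 - pq.1.2))

-- one iteration of Source B's walk ('for _ in range(n)'); indices are Python ints (Int here),
-- list indexing is pyGetD and % is PySem.Int.mod — exact wherever Source B does not raise
def stepB (E : List (Int × Int)) (n : Int) (st : Int × Int × List (Int × Int)) :
    Int × Int × List (Int × Int) :=
  let z : Int × Int := (0, 0)
  let l := st.1
  let r := st.2.1
  let cond := 0 < (PySem.List.pyGetD E l z).1 * (PySem.List.pyGetD E r z).2 -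
                  (PySem.List.pyGetD E l z).2 * (PySem.List.pyGetD E r z).1
  let l' := if cond then PySem.Int.mod (l + 1) n else l
  let r' := if cond then r else PySem.Int.mod (r + 1) n
  (l', r', st.2.2 ++ [(l', r')])

def calipers_alt (dots : List (Int × Int)) : Int :=
  -- dots[::-1] is List.reverse
  let hull := chainB dots ++ chainB dots.reverse
  let n : Int := (hull.length : Int)
  let z : Int × Int := (0, 0)
  let E := edgesB hull
  let l0 := PySem.List.minD (PySem.List.pyRange 0 n 1) (fun i => (PySem.List.pyGetD hull i z).1) 0
  let r0 := PySem.List.maxD (PySem.List.pyRange 0 n 1) (fun i => (PySem.List.pyGetD hull i z).2) 0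
  let st := (List.range hull.length).foldl (fun st _ => stepB E n st) (l0, r0, [(l0, r0)])
  -- max(_d2(hull[i], hull[j]) for i, j in pairs): first maximal of the mapped list
  (PySem.List.max? (st.2.2.map (fun ij =>
      d2 (PySem.List.pyGetD hull ij.1 z) (PySem.List.pyGetD hull ij.2 z))) (fun x => x)).getD 0

-- ===== PRECONDITION & SPEC =====
-- Pre_ excludes inputs of fewer than two points: there the hull is empty and
-- A raises IndexError at 'peek = dist(convex[l],convex[r])' (B raises ValueError at min()).
def Pre_calipers (dots : List (Int × Int)) : Prop := 2 ≤ dots.length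
instance (dots : List (Int × Int)) : Decidable (Pre_calipers dots) := by
  unfold Pre_calipers; infer_instance

def pvWitness_calipers : (List (Int × Int)) := [(0, 0), (3, 1), (1, 4)]

def Spec_calipers (dots : List (Int × Int)) (out : Int) : Prop := out = calipers_alt dots
instance (dots : List (Int × Int)) (out : Int) : Decidable (Spec_calipers dots out) := by
  unfold Spec_calipers; infer_instance

-- ===== CLAIM (what is proved, stated in full; the proofs are below) =====
def Claim_equal_calipers : Prop :=
  ∀ (dots : List (Int × Int)), Dom_calipers dots → Pre_calipers dots →
    Spec_calipers dots (calipers dots)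

-- ===== LEMMAS AND PROOFS =====

-- proof-only abbreviations for B's final reduction
def dOf (hull : List (Int × Int)) (ij : Int × Int) : Int :=
  d2 (PySem.List.pyGetD hull ij.1 (0, 0)) (PySem.List.pyGetD hull ij.2 (0, 0))
def maxOf (ds : List Int) : Int := (PySem.List.max? ds (fun x => x)).getD 0

-- B's recursive push is A's pop loop followed by the append
theorem pushB_eq : ∀ (acc : List (Int × Int)) (p : Int × Int), pushB acc p = chainStep acc p
  | [], _ => rfl
  | [_], _ => rfl
  | b :: a :: rest, p => by
      have hc : crossB a b p = -(ccw a b p) := by unfold crossB ccw; ring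
      rw [pushB, chainStep, popWhile]
      by_cases h : ccw a b p ≤ 0
      · rw [if_pos (by omega), if_pos h, pushB_eq (a :: rest) p]; rfl
      · rw [if_neg (by omega), if_neg h]

theorem chainB_eq (pts : List (Int × Int)) :
    chainB pts = ((pts.foldl chainStep []).tail).reverse := by
  have h : pushB = chainStep := by funext acc p; exact pushB_eq acc p
  rw [chainB, h, List.drop_one]

theorem popWhile_ne_nil : ∀ (acc : List (Int × Int)) (p : Int × Int), acc ≠ [] → popWhile acc p ≠ []
  | [], _, h => absurd rfl h
  | [a], p, _ => by simp [popWhile]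
  | b :: a :: rest, p, _ => by
      rw [popWhile]
      split
      · exact popWhile_ne_nil (a :: rest) p (by simp)
      · simp

theorem foldl_chain_two : ∀ (ps : List (Int × Int)) (acc : List (Int × Int)),
    acc ≠ [] → ps ≠ [] → 2 ≤ (ps.foldl chainStep acc).length
  | [], _, _, hps => absurd rfl hps
  | [p], acc, hacc, _ => by
      have h1 : popWhile acc p ≠ [] := popWhile_ne_nil acc p hacc
      simp only [List.foldl_cons, List.foldl_nil, chainStep, List.length_cons]
      have := List.length_pos_iff.mpr h1
      omega
  | p :: q :: rest, acc, hacc, _ => by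
      simp only [List.foldl_cons]
      exact foldl_chain_two (q :: rest) (chainStep acc p) (by simp [chainStep]) (by simp)

theorem chain_two (dots : List (Int × Int)) (h : 2 ≤ dots.length) :
    2 ≤ (dots.foldl chainStep []).length := by
  match dots, h with
  | p :: rest, h =>
    have hrest : rest ≠ [] := by
      intro hr
      subst hr
      simp at h
    have hstep : chainStep [] p = [p] := by simp [chainStep, popWhile]
    simpa [hstep] using foldl_chain_two rest [p] (by simp) hrest

-- Python min(xs, key) on a nonempty list is a running first-argmin fold
theorem min?_cons {α κ : Type} [LT κ] [DecidableLT κ] (key : α → κ) :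
    ∀ (xs : List α) (x : α),
      PySem.List.min? (x :: xs) key
        = some (xs.foldl (fun m y => if key y < key m then y else m) x)
  | [], _ => rfl
  | y :: xs, x => by
      have hstep : PySem.List.min? (x :: y :: xs) key
          = PySem.List.min? ((if key y < key x then y else x) :: xs) key := by
        rw [PySem.List.min?, PySem.List.min?, List.foldl_cons, List.foldl_cons, List.foldl_cons]
        congr 1
        show (if key y < key x then some y else some x) = some (if key y < key x then y else x)
        exact (apply_ite some (key y < key x) y x).symm
      rw [hstep, min?_cons key xs (if key y < key x then y else x), List.foldl_cons]

theorem max?_cons {α κ : Type} [LT κ] [DecidableLT κ] (key : α → κ) :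
    ∀ (xs : List α) (x : α),
      PySem.List.max? (x :: xs) key
        = some (xs.foldl (fun m y => if key m < key y then y else m) x)
  | [], _ => rfl
  | y :: xs, x => by
      have hstep : PySem.List.max? (x :: y :: xs) key
          = PySem.List.max? ((if key x < key y then y else x) :: xs) key := by
        rw [PySem.List.max?, PySem.List.max?, List.foldl_cons, List.foldl_cons, List.foldl_cons]
        congr 1
        show (if key x < key y then some y else some x) = some (if key x < key y then y else x)
        exact (apply_ite some (key x < key y) y x).symm
      rw [hstep, max?_cons key xs (if key x < key y then y else x), List.foldl_cons]

-- the Int-valued argmin fold over cast Nat indices is the Nat argmin fold, cast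
theorem fold_cast_min (c : List (Int × Int)) :
    ∀ (ks : List Nat) (l : Nat),
      ks.foldl (fun (a : Int) (kk : Nat) =>
          if (PySem.List.pyGetD c ((kk : Nat) : Int) (0, 0)).1 < (PySem.List.pyGetD c a (0, 0)).1
          then ((kk : Nat) : Int) else a) ((l : Nat) : Int)
        = ((ks.foldl (fun a kk => if (c.getD kk (0, 0)).1 < (c.getD a (0, 0)).1 then kk else a) l : Nat) : Int)
  | [], _ => rfl
  | kk :: ks, l => by
      simp only [List.foldl_cons]
      rw [PySem.List.pyGetD_natCast c kk (0, 0), PySem.List.pyGetD_natCast c l (0, 0)]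
      by_cases h : (c.getD kk (0, 0)).1 < (c.getD l (0, 0)).1
      · simp only [h, if_pos]
        exact fold_cast_min c ks kk
      · simp only [h, if_neg, not_false_iff]
        exact fold_cast_min c ks l

theorem fold_cast_max (c : List (Int × Int)) :
    ∀ (ks : List Nat) (l : Nat),
      ks.foldl (fun (a : Int) (kk : Nat) =>
          if (PySem.List.pyGetD c a (0, 0)).2 < (PySem.List.pyGetD c ((kk : Nat) : Int) (0, 0)).2
          then ((kk : Nat) : Int) else a) ((l : Nat) : Int)
        = ((ks.foldl (fun a kk => if (c.getD a (0, 0)).2 < (c.getD kk (0, 0)).2 then kk else a) l : Nat) : Int)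
  | [], _ => rfl
  | kk :: ks, l => by
      simp only [List.foldl_cons]
      rw [PySem.List.pyGetD_natCast c kk (0, 0), PySem.List.pyGetD_natCast c l (0, 0)]
      by_cases h : (c.getD l (0, 0)).2 < (c.getD kk (0, 0)).2
      · simp only [h, if_pos]
        exact fold_cast_max c ks kk
      · simp only [h, if_neg, not_false_iff]
        exact fold_cast_max c ks l

-- the scan keeps an index that is either its start or one of the visited ones
theorem foldl_pick_mem {pick : Nat → Nat → Nat} (h : ∀ a k, pick a k = a ∨ pick a k = k) :
    ∀ (ks : List Nat) (l : Nat), ks.foldl pick l = l ∨ ks.foldl pick l ∈ ks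
  | [], _ => Or.inl rfl
  | k :: ks, l => by
      simp only [List.foldl_cons]
      rcases foldl_pick_mem h ks (pick l k) with h1 | h1
      · rcases h l k with h2 | h2
        · exact Or.inl (h1.trans h2)
        · exact Or.inr (by rw [h1, h2]; exact List.mem_cons_self)
      · exact Or.inr (List.mem_cons_of_mem _ h1)

theorem max_ite (a b : Int) : max a b = if a < b then b else a := by
  rcases lt_or_ge a b with h | h
  · rw [if_pos h, max_eq_right (le_of_lt h)]
  · rw [if_neg (not_lt.mpr h), max_eq_left h]

-- max over a nonempty Int list is a left fold of max
theorem maxOf_cons (x : Int) (t : List Int) : maxOf (x :: t) = t.foldl max x := by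
  rw [maxOf, max?_cons (fun x => x) t x, Option.getD_some]
  congr 1
  funext m y
  exact (max_ite m y).symm

theorem maxOf_append (xs : List Int) (y : Int) (h : xs ≠ []) :
    maxOf (xs ++ [y]) = max (maxOf xs) y := by
  match xs, h with
  | x :: t, _ =>
    rw [List.cons_append, maxOf_cons, maxOf_cons, List.foldl_append, List.foldl_cons,
      List.foldl_nil]

-- the precomputed edge table entry l is hull[(l+1)%n] - hull[l]
theorem edgesB_getD (c : List (Int × Int)) (hn : 1 ≤ c.length) (l : Nat) (hl : l < c.length) :
    (edgesB c).getD l (0, 0)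
      = ((c.getD ((l + 1) % c.length) (0, 0)).1 - (c.getD l (0, 0)).1,
         (c.getD ((l + 1) % c.length) (0, 0)).2 - (c.getD l (0, 0)).2) := by
  have hslice : PySem.List.slice c (some 1) none ++ PySem.List.slice c none (some 1)
      = c.rotate 1 := by
    rw [PySem.List.slice_from c (by norm_num), PySem.List.slice_to c (by norm_num),
      List.rotate_eq_drop_append_take hn]
    rfl
  have hlen : (c.zip (c.rotate 1)).length = c.length := by
    rw [List.length_zip, List.length_rotate, Nat.min_self]
  have hl2 : l < ((c.zip (c.rotate 1)).map
      (fun pq : (Int × Int) × (Int × Int) => (pq.2.1 - pq.1.1, pq.2.2 - pq.1.2))).length := by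
    rw [List.length_map, hlen]; exact hl
  rw [edgesB, hslice, List.getD_eq_getElem _ _ hl2, List.getElem_map,
    List.getElem_zip, List.getElem_rotate]
  rw [List.getD_eq_getElem c (0,0) hl,
    List.getD_eq_getElem c (0,0) (Nat.mod_lt _ (by omega) : (l + 1) % c.length < c.length)]

-- one B step agrees with one A step (B's state carries cast indices and the trajectory)
theorem step_eq (c : List (Int × Int)) (hn : 2 ≤ c.length) (l r : Nat) (P : List (Int × Int))
    (hl : l < c.length) (hr : r < c.length) :
    ∀ peek : Int,
      stepB (edgesB c) (c.length : Int) ((l : Int), (r : Int), P)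
          = (((stepA c (l, r, peek)).1 : Int), ((stepA c (l, r, peek)).2.1 : Int),
             P ++ [(((stepA c (l, r, peek)).1 : Int), ((stepA c (l, r, peek)).2.1 : Int))])
        ∧ (stepA c (l, r, peek)).1 < c.length ∧ (stepA c (l, r, peek)).2.1 < c.length
        ∧ (stepA c (l, r, peek)).2.2
            = max peek (dOf c (((stepA c (l, r, peek)).1 : Int), ((stepA c (l, r, peek)).2.1 : Int))) := by
  intro peek
  have hl' : (l + 1) % c.length < c.length := Nat.mod_lt _ (by omega)
  have hr' : (r + 1) % c.length < c.length := Nat.mod_lt _ (by omega)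
  have hd : ∀ (i j : Nat), dOf c ((i : Int), (j : Int))
      = distA (c.getD i ((0 : Int), (0 : Int))) (c.getD j ((0 : Int), (0 : Int))) := by
    intro i j
    rw [dOf, PySem.List.pyGetD_natCast, PySem.List.pyGetD_natCast]
    rfl
  set K := ccw (0, 0)
      ((c.getD ((l + 1) % c.length) ((0 : Int), (0 : Int))).1 - (c.getD l ((0 : Int), (0 : Int))).1,
       (c.getD ((l + 1) % c.length) ((0 : Int), (0 : Int))).2 - (c.getD l ((0 : Int), (0 : Int))).2)
      ((c.getD r ((0 : Int), (0 : Int))).1 - (c.getD ((r + 1) % c.length) ((0 : Int), (0 : Int))).1,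
       (c.getD r ((0 : Int), (0 : Int))).2 - (c.getD ((r + 1) % c.length) ((0 : Int), (0 : Int))).2)
    with hK
  have hcond :
      (PySem.List.pyGetD (edgesB c) ((l : Nat) : Int) ((0 : Int), (0 : Int))).1 *
          (PySem.List.pyGetD (edgesB c) ((r : Nat) : Int) ((0 : Int), (0 : Int))).2 -
        (PySem.List.pyGetD (edgesB c) ((l : Nat) : Int) ((0 : Int), (0 : Int))).2 *
          (PySem.List.pyGetD (edgesB c) ((r : Nat) : Int) ((0 : Int), (0 : Int))).1 = K := by
    rw [PySem.List.pyGetD_natCast, PySem.List.pyGetD_natCast,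
      edgesB_getD c (by omega) l hl, edgesB_getD c (by omega) r hr, hK, ccw]
    ring
  have hmodl : PySem.Int.mod ((l : Int) + 1) (c.length : Int) = (((l + 1) % c.length : Nat) : Int) := by
    rw [show ((l : Int) + 1) = ((l + 1 : Nat) : Int) by push_cast; ring, PySem.Int.mod_natCast]
  have hmodr : PySem.Int.mod ((r : Int) + 1) (c.length : Int) = (((r + 1) % c.length : Nat) : Int) := by
    rw [show ((r : Int) + 1) = ((r + 1 : Nat) : Int) by push_cast; ring, PySem.Int.mod_natCast]
  simp only [stepA, stepB, hcond, ← hK]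
  by_cases hk : 0 < K
  · simp only [hk, if_pos]
    refine ⟨by rw [hmodl], hl', hr, ?_⟩
    rw [hd ((l + 1) % c.length) r, max_ite]
  · simp only [hk, if_neg, not_false_iff]
    refine ⟨by rw [hmodr], hl, hr', ?_⟩
    rw [hd l ((r + 1) % c.length), max_ite]

-- the recorded trajectory reduced by max equals A's running peek
theorem walk_eq (c : List (Int × Int)) (hn : 2 ≤ c.length) :
    ∀ (ticks : List Nat) (l r : Nat) (P : List (Int × Int)) (peek : Int),
      l < c.length → r < c.length → P ≠ [] → maxOf (P.map (dOf c)) = peek →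
      maxOf (((ticks.foldl (fun st _ => stepB (edgesB c) (c.length : Int) st)
            ((l : Int), (r : Int), P)).2.2).map (dOf c))
        = (ticks.foldl (fun st _ => stepA c st) (l, r, peek)).2.2
  | [], l, r, P, peek, _, _, _, hP => hP
  | _ :: ticks, l, r, P, peek, hl, hr, hPne, hP => by
      obtain ⟨heq, hl', hr', hpk⟩ := step_eq c hn l r P hl hr peek
      simp only [List.foldl_cons, heq]
      exact walk_eq c hn ticks _ _ _ _ hl' hr' (by simp)
        (by rw [List.map_append, List.map_cons, List.map_nil,
                maxOf_append _ _ (by simpa using hPne), hP, ← hpk]; rfl)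

-- the two post-hull computations agree on every hull with at least two vertices
theorem afterHull_eq (c : List (Int × Int)) (hn : 2 ≤ c.length) :
    afterHullA c
      = (let n : Int := (c.length : Int)
         let z : Int × Int := (0, 0)
         let E := edgesB c
         let l0 := PySem.List.minD (PySem.List.pyRange 0 n 1) (fun i => (PySem.List.pyGetD c i z).1) 0
         let r0 := PySem.List.maxD (PySem.List.pyRange 0 n 1) (fun i => (PySem.List.pyGetD c i z).2) 0
         let st := (List.range c.length).foldl (fun st _ => stepB E n st) (l0, r0, [(l0, r0)])
         (PySem.List.max? (st.2.2.map (fun ij =>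
             d2 (PySem.List.pyGetD c ij.1 z) (PySem.List.pyGetD c ij.2 z))) (fun x => x)).getD 0) := by
  obtain ⟨m, hm⟩ : ∃ m, c.length = m + 1 := ⟨c.length - 1, by omega⟩
  set ks : List Nat := List.map Nat.succ (List.range m) with hks
  have hksmem : ∀ k ∈ ks, k < c.length := by
    intro k hk
    rw [hks] at hk
    simp only [List.mem_map, List.mem_range] at hk
    obtain ⟨j, hj, rfl⟩ := hk
    omega
  set lA : Nat := ks.foldl
      (fun a kk => if (c.getD kk ((0 : Int), (0 : Int))).1 < (c.getD a ((0 : Int), (0 : Int))).1 then kk else a) 0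
    with hlA
  set rA : Nat := ks.foldl
      (fun a kk => if (c.getD a ((0 : Int), (0 : Int))).2 < (c.getD kk ((0 : Int), (0 : Int))).2 then kk else a) 0
    with hrA
  have hlAlt : lA < c.length := by
    rcases foldl_pick_mem
        (pick := fun a kk => if (c.getD kk ((0 : Int), (0 : Int))).1 < (c.getD a ((0 : Int), (0 : Int))).1 then kk else a)
        (fun a k => by
          by_cases h : (c.getD k ((0 : Int), (0 : Int))).1 < (c.getD a ((0 : Int), (0 : Int))).1
          · exact Or.inr (if_pos h)
          · exact Or.inl (if_neg h))
        ks 0 with h | h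
    · rw [hlA, h]; omega
    · exact hksmem _ (hlA ▸ h)
  have hrAlt : rA < c.length := by
    rcases foldl_pick_mem
        (pick := fun a kk => if (c.getD a ((0 : Int), (0 : Int))).2 < (c.getD kk ((0 : Int), (0 : Int))).2 then kk else a)
        (fun a k => by
          by_cases h : (c.getD a ((0 : Int), (0 : Int))).2 < (c.getD k ((0 : Int), (0 : Int))).2
          · exact Or.inr (if_pos h)
          · exact Or.inl (if_neg h))
        ks 0 with h | h
    · rw [hrA, h]; omega
    · exact hksmem _ (hrA ▸ h)
  -- A's seed pair-scan computes (lA, rA)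
  have hseedA : (List.range c.length).foldl (fun (lr : Nat × Nat) i =>
      (if (c.getD i ((0 : Int), (0 : Int))).1 < (c.getD lr.1 ((0 : Int), (0 : Int))).1 then i else lr.1,
       if (c.getD lr.2 ((0 : Int), (0 : Int))).2 < (c.getD i ((0 : Int), (0 : Int))).2 then i else lr.2)) (0, 0)
      = (lA, rA) := by
    rw [PySem.List.foldl_prod_mk
      (fun a i => if (c.getD i ((0 : Int), (0 : Int))).1 < (c.getD a ((0 : Int), (0 : Int))).1 then i else a)
      (fun a i => if (c.getD a ((0 : Int), (0 : Int))).2 < (c.getD i ((0 : Int), (0 : Int))).2 then i else a)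
      (List.range c.length) 0 0, hm, List.range_succ_eq_map]
    simp only [List.foldl_cons, ite_self]
    rw [hlA, hrA, hks]
  -- B's min()/max() seeds are the casts of lA, rA
  have hmin : PySem.List.minD (PySem.List.pyRange 0 ((c.length : Int)) 1)
      (fun i => (PySem.List.pyGetD c i ((0 : Int), (0 : Int))).1) 0 = ((lA : Nat) : Int) := by
    rw [PySem.List.minD, PySem.List.pyRange_one, hm]
    simp only [sub_zero, Int.toNat_natCast, List.range_succ_eq_map, List.map_cons, zero_add,
      Nat.cast_zero]
    rw [min?_cons]
    simp only [Option.getD_some]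
    rw [List.foldl_map, hlA, hks]
    exact fold_cast_min c (List.map Nat.succ (List.range m)) 0
  have hmax : PySem.List.maxD (PySem.List.pyRange 0 ((c.length : Int)) 1)
      (fun i => (PySem.List.pyGetD c i ((0 : Int), (0 : Int))).2) 0 = ((rA : Nat) : Int) := by
    rw [PySem.List.maxD, PySem.List.pyRange_one, hm]
    simp only [sub_zero, Int.toNat_natCast, List.range_succ_eq_map, List.map_cons, zero_add,
      Nat.cast_zero]
    rw [max?_cons]
    simp only [Option.getD_some]
    rw [List.foldl_map, hrA, hks]
    exact fold_cast_max c (List.map Nat.succ (List.range m)) 0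
  -- assemble: the initial trajectory is the seed pair, whose max is A's initial peek
  simp only [afterHullA, hseedA, hmin, hmax]
  have hinit : maxOf ([(((lA : Nat) : Int), ((rA : Nat) : Int))].map (dOf c))
      = distA (c.getD lA ((0 : Int), (0 : Int))) (c.getD rA ((0 : Int), (0 : Int))) := by
    rw [List.map_cons, List.map_nil, maxOf_cons, List.foldl_nil, dOf,
      PySem.List.pyGetD_natCast, PySem.List.pyGetD_natCast]
    rfl
  exact (walk_eq c hn (List.range c.length) lA rA [(((lA : Nat) : Int), ((rA : Nat) : Int))]
    (distA (c.getD lA ((0 : Int), (0 : Int))) (c.getD rA ((0 : Int), (0 : Int))))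
    hlAlt hrAlt (by simp) hinit).symm

-- ===== VERDICT (by name: the statement is the Claim_ definition above) =====
theorem calipers_spec : Claim_equal_calipers := by
  intro dots _ hpre
  unfold Pre_calipers at hpre
  unfold Spec_calipers calipers calipers_alt
  rw [chainB_eq dots, chainB_eq dots.reverse]
  have h1 : 2 ≤ (dots.foldl chainStep []).length := chain_two dots hpre
  have h2 : 2 ≤ (dots.reverse.foldl chainStep []).length :=
    chain_two dots.reverse (by simpa using hpre)
  have hn : 2 ≤ ((dots.foldl chainStep []).tail.reverse ++
      (dots.reverse.foldl chainStep []).tail.reverse).length := by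
    simp only [List.length_append, List.length_reverse, List.length_tail]
    omega
  exact afterHull_eq _ hn
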